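-- pv_equiv track=rewrite | github.com/luozi3/PotatoGallery | app/tagging.py | missing_parent_tags
-- ===== SOURCE A (Python) =====
-- from typing import Dict, List, Optional, Tuple
--
-- def missing_parent_tags(
--     tags: List[str], parent_map: Dict[str, List[str]]
-- ) -> List[str]:
--     missing: List[str] = []
--     tag_set = set(tags)
--     for tag in tags:
--         for parent in parent_map.get(tag, []):
--             if parent not in tag_set and parent not in missing:
--                 missing.append(parent)
--     return missing
-- ===== SOURCE B (Python) =====
-- def missing_parent_tags(tags, parent_map):
--     seen = set(tags)
--     candidates = [p for tag in tags for p in parent_map.get(tag, []) if p not in seen]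
--
--     def nub(lst):
--         # recursive first-occurrence dedup: keep the head, drop its later
--         # duplicates by filtering, recurse on the remainder
--         if not lst:
--             return []
--         head = lst[0]
--         return [head] + nub([x for x in lst[1:] if x != head])
--
--     return nub(candidates)
-- ===== Notes on version B (the rewrite author's own statement) =====
-- stated objective: alternative
-- what changed: A fuses collection and dedup in one pass, scanning the growing 'missing' accumulator for each parent; B first flattens the non-present parents, then dedups by structural recursion (nub): each kept head filters its later duplicates out of the remainder, so no seen-so-far accumulator or membership scan against the output exists at all.
import Mathlib
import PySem

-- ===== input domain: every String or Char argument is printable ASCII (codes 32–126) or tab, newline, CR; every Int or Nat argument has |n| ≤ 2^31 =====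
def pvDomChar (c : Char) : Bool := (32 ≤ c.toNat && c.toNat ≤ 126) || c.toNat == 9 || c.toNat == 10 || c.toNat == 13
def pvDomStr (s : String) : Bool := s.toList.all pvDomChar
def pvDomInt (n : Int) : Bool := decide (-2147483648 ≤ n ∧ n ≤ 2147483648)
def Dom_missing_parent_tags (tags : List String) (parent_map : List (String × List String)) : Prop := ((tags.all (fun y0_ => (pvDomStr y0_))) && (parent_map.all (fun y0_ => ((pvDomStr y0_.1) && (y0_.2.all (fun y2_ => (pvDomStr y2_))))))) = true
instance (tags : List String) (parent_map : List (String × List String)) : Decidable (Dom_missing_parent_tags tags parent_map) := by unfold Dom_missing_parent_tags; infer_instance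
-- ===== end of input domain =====

-- B replaces A's fused single pass (accumulator + membership scan of the growing result)
-- by flatten-then-recursive-dedup: each kept head filters its later duplicates out of the
-- remainder (nub); same return value, different decomposition.

-- ===== PORT A =====
def missing_parent_tags (tags : List String) (parent_map : List (String × List String)) : List String :=
  let tag_set : PySem.Set String := PySem.Set.ofList tags
  tags.foldl (fun missing tag =>
    ((PySem.Dict.mk parent_map).getD tag []).foldl (fun missing parent =>
      if ¬ tag_set.contains parent ∧ ¬ missing.contains parent then missing ++ [parent]
      else missing) missing) []

-- ===== PORT B =====
-- B's recursive helper nub: keep the head, filter its duplicates from the tail, recurse.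
def pvNub : List String → List String
  | [] => []
  | x :: xs => x :: pvNub (xs.filter (fun y => y ≠ x))
termination_by l => l.length
decreasing_by
  refine Nat.lt_succ_of_le ?_
  simpa using List.length_filter_le _ xs.attach

def missing_parent_tags_alt (tags : List String) (parent_map : List (String × List String)) : List String :=
  let seen : PySem.Set String := PySem.Set.ofList tags
  let candidates : List String := tags.flatMap (fun tag =>
    ((PySem.Dict.mk parent_map).getD tag []).filter (fun p => !(seen.contains p)))
  pvNub candidates

-- ===== PRECONDITION & SPEC =====
def Spec_missing_parent_tags (tags : List String) (parent_map : List (String × List String)) (out : List String) : Prop := out = missing_parent_tags_alt tags parent_map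
instance (tags : List String) (parent_map : List (String × List String)) (out : List String) : Decidable (Spec_missing_parent_tags tags parent_map out) := by unfold Spec_missing_parent_tags; infer_instance

-- ===== CLAIM =====
def Claim_equal_missing_parent_tags : Prop := ∀ (tags : List String) (parent_map : List (String × List String)), Dom_missing_parent_tags tags parent_map → Spec_missing_parent_tags tags parent_map (missing_parent_tags tags parent_map)

-- ===== LEMMAS AND PROOFS =====

-- A's inner loop over one tag's parents = Set.add-fold over the filtered parents.
theorem inner_eq_filter_fold (seen : List String) :
    ∀ (l acc : List String),
    l.foldl (fun m p => if ¬ seen.contains p ∧ ¬ m.contains p then m ++ [p] else m) acc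
      = (l.filter (fun p => !(seen.contains p))).foldl PySem.Set.add acc := by
  intro l
  induction l with
  | nil => intro acc; rfl
  | cons p rest ih =>
    intro acc
    rw [List.foldl_cons, List.filter_cons]
    by_cases hs : seen.contains p = true
    · rw [if_neg (by simp_all), if_neg (by simp_all)]
      exact ih acc
    · have hfil : (!seen.contains p) = true := by simp_all
      rw [if_pos hfil, List.foldl_cons]
      have hstep : (if ¬ seen.contains p = true ∧ ¬ acc.contains p = true then acc ++ [p] else acc)
          = PySem.Set.add acc p := by
        by_cases hm : acc.contains p = true <;> simp_all [PySem.Set.add]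
      rw [hstep]
      exact ih _

-- A fold of folds is a fold over the flattened list.
theorem foldl_foldl_flatMap {α β γ : Type} (f : γ → β → γ) (g : α → List β) :
    ∀ (l : List α) (init : γ),
    l.foldl (fun acc x => (g x).foldl f acc) init = (l.flatMap g).foldl f init := by
  intro l
  induction l with
  | nil => intro init; rfl
  | cons x rest ih => intro init; simp [List.foldl_append, ih]

-- pvNub's cons equation, usable by rw.
theorem pvNub_nil : pvNub [] = [] := by
  rw [pvNub.eq_def]

theorem pvNub_cons (x : String) (xs : List String) :
    pvNub (x :: xs) = x :: pvNub (xs.filter (fun y => y ≠ x)) := by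
  rw [pvNub.eq_def]

-- The Set.add fold (first-occurrence dedup with an accumulator) equals the
-- filter-based recursive nub of the not-yet-seen elements.
theorem foldl_add_eq_nub :
    ∀ (l acc : List String),
    l.foldl PySem.Set.add acc = acc ++ pvNub (l.filter (fun x => !acc.contains x)) := by
  intro l
  induction l with
  | nil => intro acc; simp [pvNub_nil]
  | cons x xs ih =>
    intro acc
    rw [List.foldl_cons, List.filter_cons]
    by_cases h : x ∈ acc
    · have hadd : PySem.Set.add acc x = acc := by simp [PySem.Set.add, h]
      rw [hadd, ih acc, if_neg (by simp [h])]
    · have hadd : PySem.Set.add acc x = acc ++ [x] := by simp [PySem.Set.add, h]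
      rw [hadd, ih (acc ++ [x]), if_pos (by simp [h]), pvNub_cons, List.append_assoc,
        List.singleton_append]
      have hfe : xs.filter (fun y => !(acc ++ [x]).contains y)
          = (xs.filter (fun y => !acc.contains y)).filter (fun y => y ≠ x) := by
        rw [List.filter_filter]
        apply List.filter_congr
        intro y _
        by_cases hy : y = x <;> simp [hy, h]
      rw [hfe]

-- ===== VERDICT =====
theorem missing_parent_tags_spec : Claim_equal_missing_parent_tags := by
  intro tags parent_map _
  show missing_parent_tags tags parent_map = missing_parent_tags_alt tags parent_map
  simp only [missing_parent_tags, missing_parent_tags_alt]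
  trans (List.foldl PySem.Set.add [] (tags.flatMap (fun tag =>
    ((PySem.Dict.mk parent_map).getD tag []).filter
      (fun p => !((PySem.Set.ofList tags).contains p)))))
  · rw [← foldl_foldl_flatMap]
    exact List.foldl_ext _ _ _ (fun m tag _ => inner_eq_filter_fold _ _ m)
  · rw [foldl_add_eq_nub]
    simp
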